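-- pv_equiv track=rewrite | github.com/Bonorinoa/leanecon_v3 | src/prover/tactics.py | _top_level_symbol_index
-- ===== SOURCE A (Python) =====
-- def _top_level_symbol_index(text: str, symbol: str) -> int:
--     depth = 0
--     for index, char in enumerate(text):
--         if char in "([{":
--             depth += 1
--             continue
--         if char in ")]}":
--             depth = max(0, depth - 1)
--             continue
--         if depth == 0 and text.startswith(symbol, index):
--             return index
--     return -1
-- ===== SOURCE B (Python) =====
-- def _top_level_symbol_index(text: str, symbol: str) -> int:
--     # search-then-verify: jump to the next occurrence with str.find, then
--     # catch the bracket-depth counter up to that position before accepting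
--     n = len(text)
--     depth = 0
--     scanned = 0          # depth accounts for text[:scanned]
--     cursor = 0
--     while True:
--         pos = text.find(symbol, cursor)
--         if pos == -1:
--             return -1
--         while scanned < pos:
--             c = text[scanned]
--             if c in "([{":
--                 depth += 1
--             elif c in ")]}":
--                 depth = max(0, depth - 1)
--             scanned += 1
--         if pos >= n:      # empty symbol found at end of text
--             return -1
--         c = text[pos]
--         if c in "([{":
--             depth += 1
--         elif c in ")]}":
--             depth = max(0, depth - 1)
--         elif depth == 0:
--             return pos
--         scanned = pos + 1
--         cursor = pos + 1
-- ===== Notes on version B (the rewrite author's own statement) =====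
-- stated objective: faster
-- what changed: A scans every character in a Python-level loop checking startswith at each top-level position; B instead jumps between candidate occurrences with str.find(symbol, cursor) and only catches the bracket-depth counter up to each candidate before accepting it.
import Mathlib
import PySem

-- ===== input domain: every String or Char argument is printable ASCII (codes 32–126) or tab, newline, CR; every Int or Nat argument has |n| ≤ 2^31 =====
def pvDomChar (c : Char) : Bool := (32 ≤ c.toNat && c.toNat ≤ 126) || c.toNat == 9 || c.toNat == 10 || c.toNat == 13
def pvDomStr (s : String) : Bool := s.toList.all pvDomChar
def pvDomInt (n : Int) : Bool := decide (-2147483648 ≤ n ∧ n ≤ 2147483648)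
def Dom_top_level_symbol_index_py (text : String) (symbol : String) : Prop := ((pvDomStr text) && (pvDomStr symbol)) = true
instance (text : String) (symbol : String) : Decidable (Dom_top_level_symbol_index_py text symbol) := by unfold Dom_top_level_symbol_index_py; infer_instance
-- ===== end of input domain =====

-- B replaces A's char-by-char scan with a search-then-verify loop that jumps
-- between candidate occurrences via str.find, catching the depth counter up to
-- each candidate (measurably faster: str.find skips at C speed; same exact result).

-- ===== PORT A =====
def pvOpens : List Char := ['(', '[', '{']
def pvCloses : List Char := [')', ']', '}']

-- A's single loop over enumerate(text); startswith checks the current suffix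
def pvGoA (symbol : List Char) : List Char → Int → Int → Int
  | [], _, _ => -1
  | c :: rest, index, depth =>
    if c ∈ pvOpens then pvGoA symbol rest (index + 1) (depth + 1)
    else if c ∈ pvCloses then pvGoA symbol rest (index + 1) (max 0 (depth - 1))
    else if depth = 0 ∧ PySem.Chars.startswith (c :: rest) symbol = true then index
    else pvGoA symbol rest (index + 1) depth

def top_level_symbol_index_py (text : String) (symbol : String) : Int :=
  pvGoA symbol.toList text.toList 0 0

-- ===== PORT B =====
-- one step of the inner catch-up while-loop of Source B
def pvStep (d : Int) (c : Char) : Int :=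
  if c ∈ pvOpens then d + 1 else if c ∈ pvCloses then max 0 (d - 1) else d

-- Source B's outer while-loop; fuel bounds the iterations (cursor grows each round,
-- so text.length + 2 units never run out — proved via the equivalence lemma)
def pvLoopB (text symbol : List Char) : Nat → Nat → Int → Nat → Int
  | 0, _, _, _ => -1
  | fuel + 1, scanned, depth, cursor =>
    if PySem.Chars.findFrom text symbol (cursor : Int) = -1 then -1
    else
      match text.drop (PySem.Chars.findFrom text symbol (cursor : Int)).toNat with
      | [] => -1  -- pos == len(text): empty symbol found at the very end
      | c :: _ =>
        if c ∈ pvOpens then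
          pvLoopB text symbol fuel ((PySem.Chars.findFrom text symbol (cursor : Int)).toNat + 1)
            (((text.drop scanned).take ((PySem.Chars.findFrom text symbol (cursor : Int)).toNat - scanned)).foldl pvStep depth + 1)
            ((PySem.Chars.findFrom text symbol (cursor : Int)).toNat + 1)
        else if c ∈ pvCloses then
          pvLoopB text symbol fuel ((PySem.Chars.findFrom text symbol (cursor : Int)).toNat + 1)
            (max 0 (((text.drop scanned).take ((PySem.Chars.findFrom text symbol (cursor : Int)).toNat - scanned)).foldl pvStep depth - 1))
            ((PySem.Chars.findFrom text symbol (cursor : Int)).toNat + 1)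
        else if ((text.drop scanned).take ((PySem.Chars.findFrom text symbol (cursor : Int)).toNat - scanned)).foldl pvStep depth = 0 then
          ((PySem.Chars.findFrom text symbol (cursor : Int)).toNat : Int)
        else
          pvLoopB text symbol fuel ((PySem.Chars.findFrom text symbol (cursor : Int)).toNat + 1)
            (((text.drop scanned).take ((PySem.Chars.findFrom text symbol (cursor : Int)).toNat - scanned)).foldl pvStep depth)
            ((PySem.Chars.findFrom text symbol (cursor : Int)).toNat + 1)

def top_level_symbol_index_py_alt (text : String) (symbol : String) : Int :=
  pvLoopB text.toList symbol.toList (text.toList.length + 2) 0 0 0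

-- ===== PRECONDITION & SPEC =====
def Spec_top_level_symbol_index_py (text : String) (symbol : String) (out : Int) : Prop := out = top_level_symbol_index_py_alt text symbol
instance (text : String) (symbol : String) (out : Int) : Decidable (Spec_top_level_symbol_index_py text symbol out) := by unfold Spec_top_level_symbol_index_py; infer_instance

-- ===== CLAIM (what is proved, stated in full; the proofs are below) =====
def Claim_equal_top_level_symbol_index_py : Prop := ∀ (text : String) (symbol : String), Dom_top_level_symbol_index_py text symbol → Spec_top_level_symbol_index_py text symbol (top_level_symbol_index_py text symbol)

-- ===== LEMMAS AND PROOFS =====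

-- if symbol occurs nowhere in cs, A's scan returns -1 whatever the depth
lemma pvGoA_none (symbol : List Char) : ∀ (cs : List Char) (i d : Int),
    (∀ j : Nat, ¬ symbol <+: cs.drop j) → pvGoA symbol cs i d = -1 := by
  intro cs
  induction cs with
  | nil => intro i d _; rfl
  | cons c rest ih =>
    intro i d h
    have hrest : ∀ j : Nat, ¬ symbol <+: rest.drop j := fun j => by
      simpa using h (j + 1)
    have h0 : ¬ symbol <+: (c :: rest) := by simpa using h 0
    simp only [pvGoA]
    split_ifs with h1 h2 h3
    · exact ih (i + 1) (d + 1) hrest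
    · exact ih (i + 1) (max 0 (d - 1)) hrest
    · exact absurd ((PySem.Chars.startswith_iff _ _).mp h3.2) h0
    · exact ih (i + 1) d hrest

-- A's scan steps through a match-free segment exactly as pvStep folds over it
lemma pvGoA_skip (symbol : List Char) : ∀ (k : Nat) (cs : List Char) (i d : Int),
    k ≤ cs.length → (∀ j : Nat, j < k → ¬ symbol <+: cs.drop j) →
    pvGoA symbol cs i d = pvGoA symbol (cs.drop k) (i + k) ((cs.take k).foldl pvStep d) := by
  intro k
  induction k with
  | zero => intro cs i d _ _; simp
  | succ k ih =>
    intro cs i d hk h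
    match cs with
    | [] => simp at hk
    | c :: rest =>
      have hk' : k ≤ rest.length := by simpa using hk
      have hrest : ∀ j : Nat, j < k → ¬ symbol <+: rest.drop j := fun j hj => by
        simpa using h (j + 1) (by omega)
      have h0 : ¬ symbol <+: (c :: rest) := by simpa using h 0 (by omega)
      have harith : i + 1 + (k : Int) = i + ((k : Nat) + 1 : Nat) := by push_cast; ring
      simp only [pvGoA, List.drop_succ_cons, List.take_succ_cons, List.foldl_cons]
      split_ifs with h1 h2 h3
      · rw [ih rest (i + 1) (d + 1) hk' hrest, harith]
        congr 1
        simp [pvStep, h1]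
      · rw [ih rest (i + 1) (max 0 (d - 1)) hk' hrest, harith]
        congr 1
        simp [pvStep, h1, h2]
      · exact absurd ((PySem.Chars.startswith_iff _ _).mp h3.2) h0
      · rw [ih rest (i + 1) d hk' hrest, harith]
        congr 1
        simp [pvStep, h1, h2]

-- main loop invariant: with scanned = cursor and enough fuel, B's jumping loop
-- computes exactly A's scan of the remaining suffix
lemma pvLoopB_eq (text symbol : List Char) : ∀ (fuel cursor : Nat) (d : Int),
    cursor ≤ text.length → text.length + 1 ≤ fuel + cursor →
    pvLoopB text symbol fuel cursor d cursor = pvGoA symbol (text.drop cursor) (cursor : Int) d := by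
  intro fuel
  induction fuel with
  | zero => intro cursor d hc hf; omega
  | succ fuel ih =>
    intro cursor d hc hf
    by_cases hpos : PySem.Chars.findFrom text symbol (cursor : Int) = -1
    · -- no occurrence at or after cursor: both return -1
      have hninf : ¬ symbol <:+: text.drop cursor :=
        (PySem.Chars.findFrom_natCast_eq_neg_one_iff text symbol cursor hc).mp hpos
      have hnone : ∀ j : Nat, ¬ symbol <+: (text.drop cursor).drop j := by
        intro j hj
        exact hninf ((PySem.Chars.isIn_iff_infix symbol (text.drop cursor)).mp
          ((PySem.Chars.exists_prefix_drop_iff_isIn symbol (text.drop cursor)).mp ⟨j, hj⟩))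
      rw [pvGoA_none symbol _ _ _ hnone]
      simp [pvLoopB, hpos]
    · obtain ⟨hge, hpre, hmin⟩ := PySem.Chars.findFrom_natCast_spec text symbol cursor hc hpos
      set pos := PySem.Chars.findFrom text symbol (cursor : Int) with hposdef
      have hposnn : 0 ≤ pos := le_trans (by positivity) hge
      set p := pos.toNat with hpdef
      have hcp : cursor ≤ p := by omega
      have hplen : p ≤ text.length := by
        have := PySem.Chars.findFrom_natCast text symbol cursor hc
        rw [← hposdef] at this
        by_cases hf1 : PySem.Chars.find (text.drop cursor) symbol = -1
        · rw [this, if_pos hf1] at hpos; simp at hpos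
        · rw [this, if_neg hf1]  at hposdef
          have hle := PySem.Chars.find_le_length (text.drop cursor) symbol
          have : ((text.drop cursor).length : Int) = (text.length : Int) - cursor := by
            simp [List.length_drop]; omega
          omega
      -- rewrite A's side: skip the match-free segment [cursor, p)
      have hseg : ∀ j : Nat, j < p - cursor → ¬ symbol <+: (text.drop cursor).drop j := by
        intro j hj
        rw [List.drop_drop]
        have := hmin (j + cursor) (by omega) (by omega)
        rwa [Nat.add_comm] at this
      have hA := pvGoA_skip symbol (p - cursor) (text.drop cursor) (cursor : Int) d
        (by simp [List.length_drop]; omega) hseg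
      rw [List.drop_drop] at hA
      have hpc : cursor + (p - cursor) = p := by omega
      have hpc2 : (cursor : Int) + ((p - cursor : Nat) : Int) = (p : Int) := by omega
      rw [hpc, hpc2] at hA
      rw [hA]
      -- now compare with B's step at position p
      rcases htl : text.drop p with _ | ⟨c, rest⟩
      · -- p = text.length: empty symbol at the end; both give -1
        simp only [pvLoopB, ← hposdef, if_neg hpos, ← hpdef, htl]
        rfl
      · have hplt : p < text.length := by
          by_contra hge'
          have : text.drop p = [] := List.drop_eq_nil_of_le (by omega)
          rw [this] at htl; cases htl
        have hrest : rest = text.drop (p + 1) := by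
          have h' := congrArg (List.drop 1) htl
          rw [List.drop_drop] at h'
          simpa [Nat.add_comm] using h'.symm
        have hstart : PySem.Chars.startswith (c :: rest) symbol = true :=
          (PySem.Chars.startswith_iff _ _).mpr (htl ▸ hpre)
        have hih : ∀ d' : Int, pvLoopB text symbol fuel (p + 1) d' (p + 1) =
            pvGoA symbol (text.drop (p + 1)) ((p : Int) + 1) d' := by
          intro d'
          have := ih (p + 1) d' (by omega) (by omega)
          simpa [Int.natCast_add] using this
        simp only [pvLoopB, ← hposdef, if_neg hpos, ← hpdef, htl]
        simp only [pvGoA, hstart, and_true]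
        split_ifs with h1 h2 h3
        · rw [hih, ← hrest]
        · rw [hih, ← hrest]
        · rfl
        · rw [hih, ← hrest]

-- ===== VERDICT (by name: the statement is the Claim_ definition above) =====
theorem top_level_symbol_index_py_spec : Claim_equal_top_level_symbol_index_py := by
  intro text symbol _
  unfold Spec_top_level_symbol_index_py top_level_symbol_index_py top_level_symbol_index_py_alt
  have := pvLoopB_eq text.toList symbol.toList (text.toList.length + 2) 0 0 (by omega) (by omega)
  simpa using this.symm
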